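-- pv_equiv track=rewrite | github.com/wonhyukchoi/biquasiles | biquasiles.py | abqslist
-- ===== SOURCE A (Python) =====
-- def zeromatrix(n):
--     ### return n by n zero matrix###
--     out = []
--     for i in range(0,n):
--         r = []
--         for j in range(0,n): r.append(0)
--         out.append(r)
--     return out
--
-- def abqs(d,s,n,m):
--     ### Alex Biquasile
--     out=[zeromatrix(m),zeromatrix(m)]
--     for x in range(1,m+1):
--         for y in range(1,m+1):
--             out[0][x-1][y-1]=(-d*s*n*n*x+n*y)%m
--             out[1][x-1][y-1]=(d*x+s*y)%m
--     for x in range(0,m):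
--         for y in range(0,m):
--             for j in [0,1]:
--                 if out[j][x][y]==0:
--                     out[j][x][y]=m
--     return out
--
-- def abqslist(p,m):
-- 	### Returns a list of all possible Alexander Biquasiles in Z_n
-- 	### args:
-- 	### p = p of Z/pZ
-- 	### m = rank of matrix
--
-- 	out=[]
-- 	d = 0
-- 	while d < p:
-- 		s = 0
-- 		while s < p:
-- 			n = 0
-- 			while n < p:
-- 				out.append(abqs(d,s,n,m))
-- 				n = n+1
-- 			s = s+1
-- 		d = d +1
-- 	return out
-- ===== SOURCE B (Python) =====
-- def abqslist(p, m):
--     ### Memoized enumeration: both matrices of abqs are instances of one generator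
--     ### mat(a, b) with entries (a*x + b*y) in 1..m, and mat depends only on
--     ### (a mod m, b mod m) -- so distinct matrices are built once and shared.
--     cache = {}
--
--     def mat(a, b):
--         if m > 0:
--             a %= m
--             b %= m
--         key = (a, b)
--         if key not in cache:
--             cache[key] = [[(a * x + b * y - 1) % m + 1 for y in range(1, m + 1)]
--                           for x in range(1, m + 1)]
--         return cache[key]
--
--     return [[mat(-d * s * n * n, n), mat(d, s)]
--             for d in range(p) for s in range(p) for n in range(p)]
-- ===== Notes on version B (the rewrite author's own statement) =====
-- stated objective: alternative
-- what changed: Replaces A's recompute-every-matrix scheme (p^3 times a fill pass plus a zero-fixing sweep over two fresh m x m matrices) by a memoized single generator: each matrix depends only on its coefficient pair reduced mod m, so B caches matrices in a dict keyed by (a%m, b%m) and builds each distinct matrix once, emitting shared references.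
import Mathlib
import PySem

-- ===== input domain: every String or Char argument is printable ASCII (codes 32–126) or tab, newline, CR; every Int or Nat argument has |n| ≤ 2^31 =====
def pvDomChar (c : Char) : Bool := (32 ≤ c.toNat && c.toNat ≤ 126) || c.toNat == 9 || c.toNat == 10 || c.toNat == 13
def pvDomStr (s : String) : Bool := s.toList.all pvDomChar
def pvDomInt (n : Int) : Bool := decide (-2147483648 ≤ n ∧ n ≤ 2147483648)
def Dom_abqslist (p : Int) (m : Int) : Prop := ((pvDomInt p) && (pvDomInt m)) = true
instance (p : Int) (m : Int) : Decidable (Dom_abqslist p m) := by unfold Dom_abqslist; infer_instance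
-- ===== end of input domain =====

-- B memoizes: each matrix depends only on its coefficient pair mod m, so a dict-cached single
-- generator builds every distinct matrix once instead of filling+fixing 2*p^3 fresh matrices
-- (objective: alternative algorithm; equal output, shared references in B's result).

-- ===== PORT A =====
-- zeromatrix(n): two append loops
def zeromatrix (n : Int) : List (List Int) :=
  (PySem.List.pyRange 0 n 1).foldl
    (fun out _ => out ++ [(PySem.List.pyRange 0 n 1).foldl (fun r _ => r ++ [(0 : Int)]) []]) []

-- abqs(d,s,n,m): fill pass (entries expr % m), then fix pass (0 -> m); the pair is Python's
-- two-element list out = [matrix0, matrix1]; in-place item assignment is List.modify/List.set.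
def abqs (d : Int) (s : Int) (n : Int) (m : Int) : List (List (List Int)) :=
  let st0 := (zeromatrix m, zeromatrix m)
  let st1 := (PySem.List.pyRange 1 (m+1) 1).foldl (fun st x =>
    (PySem.List.pyRange 1 (m+1) 1).foldl
      (fun (st : List (List Int) × List (List Int)) y =>
        (st.1.modify (x-1).toNat (fun row => row.set (y-1).toNat (PySem.Int.mod (-d*s*n*n*x + n*y) m)),
         st.2.modify (x-1).toNat (fun row => row.set (y-1).toNat (PySem.Int.mod (d*x + s*y) m)))) st) st0
  let st2 := (PySem.List.pyRange 0 m 1).foldl (fun st x =>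
    (PySem.List.pyRange 0 m 1).foldl
      (fun (st : List (List Int) × List (List Int)) y =>
        (st.1.modify x.toNat (fun row => if row.getD y.toNat 0 = 0 then row.set y.toNat m else row),
         st.2.modify x.toNat (fun row => if row.getD y.toNat 0 = 0 then row.set y.toNat m else row))) st) st1
  [st2.1, st2.2]

-- the three while loops of abqslist, innermost first
def abqsLoopN (d : Int) (s : Int) (m : Int) (p : Int) (n : Int)
    (out : List (List (List (List Int)))) : List (List (List (List Int))) :=
  if n < p then abqsLoopN d s m p (n+1) (out ++ [abqs d s n m]) else out
termination_by (p - n).toNat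
decreasing_by omega

def abqsLoopS (d : Int) (m : Int) (p : Int) (s : Int)
    (out : List (List (List (List Int)))) : List (List (List (List Int))) :=
  if s < p then abqsLoopS d m p (s+1) (abqsLoopN d s m p 0 out) else out
termination_by (p - s).toNat
decreasing_by omega

def abqsLoopD (m : Int) (p : Int) (d : Int)
    (out : List (List (List (List Int)))) : List (List (List (List Int))) :=
  if d < p then abqsLoopD m p (d+1) (abqsLoopS d m p 0 out) else out
termination_by (p - d).toNat
decreasing_by omega

def abqslist (p : Int) (m : Int) : List (List (List (List Int))) :=
  abqsLoopD m p 0 []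

-- ===== PORT B =====
-- the comprehension inside mat(a, b) of Source B
def altMat (m a b : Int) : List (List Int) :=
  (PySem.List.pyRange 1 (m+1) 1).map (fun x =>
    (PySem.List.pyRange 1 (m+1) 1).map (fun y => PySem.Int.mod (a*x + b*y - 1) m + 1))

-- mat(a, b): reduce the coefficients mod m (when m > 0), then look the key up in the cache;
-- on a miss store the freshly built matrix (Python's `cache[key] = ...; return cache[key]`
-- returns exactly the value just stored).
def altGet (m : Int) (cache : PySem.Dict (Int × Int) (List (List Int))) (a b : Int) :
    PySem.Dict (Int × Int) (List (List Int)) × List (List Int) :=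
  let a' := if 0 < m then PySem.Int.mod a m else a
  let b' := if 0 < m then PySem.Int.mod b m else b
  match cache.get? (a', b') with
  | some v => (cache, v)
  | none => (cache.insert (a', b') (altMat m a' b'), altMat m a' b')

-- the comprehension over d, s, n threading the closure's cache
def abqslist_alt (p : Int) (m : Int) : List (List (List (List Int))) :=
  ((PySem.List.pyRange 0 p 1).foldl (fun st d =>
    (PySem.List.pyRange 0 p 1).foldl (fun st s =>
      (PySem.List.pyRange 0 p 1).foldl
        (fun (st : PySem.Dict (Int × Int) (List (List Int)) × List (List (List (List Int)))) n =>
          let r1 := altGet m st.1 (-d*s*n*n) n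
          let r2 := altGet m r1.1 d s
          (r2.1, st.2 ++ [[r1.2, r2.2]])) st) st) (PySem.Dict.empty, [])).2

-- ===== PRECONDITION & SPEC =====
def Spec_abqslist (p : Int) (m : Int) (out : List (List (List (List Int)))) : Prop := out = abqslist_alt p m
instance (p : Int) (m : Int) (out : List (List (List (List Int)))) : Decidable (Spec_abqslist p m out) := by unfold Spec_abqslist; infer_instance

-- ===== CLAIM (what is proved, stated in full; the proofs are below) =====
def Claim_equal_abqslist : Prop := ∀ (p : Int) (m : Int), Dom_abqslist p m → Spec_abqslist p m (abqslist p m)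

-- ===== LEMMAS AND PROOFS =====

-- general list facts about updates at an index inside an append
lemma pv_getD_append {α : Type} (l1 : List α) (a : α) (l2 : List α) (d : α) :
    (l1 ++ a :: l2).getD l1.length d = a := by
  induction l1 with
  | nil => rfl
  | cons b t ih => simp

lemma pv_modify_append {α : Type} (l1 : List α) (a : α) (l2 : List α) (f : α → α) :
    (l1 ++ a :: l2).modify l1.length f = l1 ++ f a :: l2 := by
  induction l1 with
  | nil => simp
  | cons b t ih => simpa using ih

lemma pv_modify_modify {α : Type} (l : List α) (i : Nat) (f g : α → α) :
    (l.modify i f).modify i g = l.modify i (fun v => g (f v)) := by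
  induction l generalizing i with
  | nil => simp
  | cons a t ih =>
    cases i with
    | zero => simp
    | succ j => simpa using ih j

lemma pv_modify_fun_id {α : Type} (l : List α) (i : Nat) : l.modify i (fun v => v) = l := by
  induction l generalizing i with
  | nil => simp
  | cons a t ih =>
    cases i with
    | zero => simp
    | succ j => simpa using ih j

lemma pv_foldl_prod_mk' {β σ₁ σ₂ : Type} (f : σ₁ → β → σ₁) (g : σ₂ → β → σ₂) (l : List β)
    (st : σ₁ × σ₂) :
    List.foldl (fun s e => (f s.1 e, g s.2 e)) st l = (List.foldl f st.1 l, List.foldl g st.2 l) :=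
  PySem.List.foldl_prod_mk f g l st.1 st.2

-- a double fold over a pair state with componentwise body splits into two double folds
lemma pv_double_split {β γ σ₁ σ₂ : Type} (f : γ → σ₁ → β → σ₁) (g : γ → σ₂ → β → σ₂)
    (ys : γ → List β) :
    ∀ (xs : List γ) (st : σ₁ × σ₂),
      xs.foldl (fun st x => (ys x).foldl (fun (st : σ₁ × σ₂) y => (f x st.1 y, g x st.2 y)) st) st
        = (xs.foldl (fun a x => (ys x).foldl (f x) a) st.1,
           xs.foldl (fun b x => (ys x).foldl (g x) b) st.2) := by
  intro xs
  induction xs with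
  | nil => intro st; rfl
  | cons x t ih =>
    intro st
    simp only [List.foldl_cons]
    rw [pv_foldl_prod_mk' (f x) (g x) (ys x) st, ih]

lemma pv_foldl_modify_collapse {α β : Type} (i : Nat) (h : β → α → α) :
    ∀ (ys : List β) (l : List α),
      ys.foldl (fun acc y => acc.modify i (h y)) l
        = l.modify i (fun v => ys.foldl (fun v y => h y v) v) := by
  intro ys
  induction ys with
  | nil => intro l; simp [pv_modify_fun_id]
  | cons y t ih =>
    intro l
    simp only [List.foldl_cons]
    rw [ih, pv_modify_modify]

-- a pass over range' lo k modifying index i at step i rewrites todo elementwise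
lemma pv_foldl_modify_pass {α : Type} (h : Nat → α → α) :
    ∀ (todo done : List α),
      (List.range' done.length todo.length).foldl (fun l i => l.modify i (h i)) (done ++ todo)
        = done ++ List.zipWith h (List.range' done.length todo.length) todo := by
  intro todo
  induction todo with
  | nil => intro done; simp
  | cons a t ih =>
    intro done
    rw [List.length_cons, List.range'_succ, List.foldl_cons, pv_modify_append,
      List.zipWith_cons_cons]
    have := ih (done ++ [h done.length a])
    simp only [List.length_append, List.length_cons, List.length_nil, List.append_assoc,
      List.cons_append, List.nil_append] at this ⊢
    exact this

lemma pv_zipWith_replicate {α β γ : Type} (f : α → β → γ) (c : β) :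
    ∀ (l : List α), List.zipWith f l (List.replicate l.length c) = l.map (fun x => f x c) := by
  intro l
  induction l with
  | nil => rfl
  | cons a t ih => simp [List.replicate_succ, ih]

lemma pv_zipWith_snd {α β : Type} (h : α → α) :
    ∀ (l : List β) (l' : List α), l.length = l'.length →
      List.zipWith (fun _ v => h v) l l' = l'.map h := by
  intro l
  induction l with
  | nil => intro l' hl; simp [List.eq_nil_of_length_eq_zero hl.symm]
  | cons a t ih =>
    intro l' hl
    cases l' with
    | nil => simp at hl
    | cons b t' => simpa using ih t' (by simpa using hl)

-- the zero -> m fix fold over a row is an elementwise map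
lemma pv_rowfix_fold (m0 : Int) :
    ∀ (todo done : List Int),
      (List.range' done.length todo.length).foldl
          (fun row y => if row.getD y 0 = 0 then row.set y m0 else row) (done ++ todo)
        = done ++ todo.map (fun v => if v = 0 then m0 else v) := by
  intro todo
  induction todo with
  | nil => intro done; simp
  | cons a t ih =>
    intro done
    rw [List.length_cons, List.range'_succ, List.foldl_cons, pv_getD_append]
    have step : (if a = 0 then (done ++ a :: t).set done.length m0 else done ++ a :: t)
        = (done ++ [if a = 0 then m0 else a]) ++ t := by
      by_cases ha : a = 0
      · simp [ha, List.set_eq_modify, pv_modify_append]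
      · simp [ha]
    rw [step]
    have := ih (done ++ [if a = 0 then m0 else a])
    simp only [List.length_append, List.length_cons, List.length_nil, List.append_assoc,
      List.cons_append, List.nil_append] at this ⊢
    exact this

lemma pv_zeromatrix_eq (m : Int) :
    zeromatrix m = List.replicate m.toNat (List.replicate m.toNat (0 : Int)) := by
  simp [zeromatrix, List.map_const', PySem.List.length_pyRange_one]

-- corollaries of the pass lemma
lemma pv_pass_replicate {α : Type} (h : Nat → α → α) (k : Nat) (c : α) :
    (List.range' 0 k).foldl (fun l i => l.modify i (h i)) (List.replicate k c)
      = (List.range' 0 k).map (fun i => h i c) := by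
  have h1 := pv_foldl_modify_pass h (List.replicate k c) []
  simp only [List.nil_append, List.length_nil, List.length_replicate] at h1
  rw [h1]
  rw [show List.replicate k c = List.replicate (List.range' 0 k).length c from by simp]
  exact pv_zipWith_replicate h c (List.range' 0 k)

lemma pv_fix_matrix (m0 : Int) (k : Nat) (M : List (List Int)) (hM : M.length = k)
    (hrow : ∀ row ∈ M, row.length = k) :
    (List.range' 0 k).foldl (fun mat i => mat.modify i (fun row =>
        (List.range' 0 k).foldl (fun row j => if row.getD j 0 = 0 then row.modify j (fun _ => m0) else row) row)) M
      = M.map (fun row => row.map (fun v => if v = 0 then m0 else v)) := by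
  subst hM
  simp only [← List.set_eq_modify]
  have h1 := pv_foldl_modify_pass (fun _ row =>
      (List.range' 0 M.length).foldl (fun row j => if row.getD j 0 = 0 then row.set j m0 else row) row) M []
  simp only [List.nil_append, List.length_nil] at h1
  rw [h1]
  refine ((pv_zipWith_snd _ _ _ (by simp)).trans ?_)
  refine List.map_congr_left ?_
  intro row hr
  rw [← hrow row hr]
  have := pv_rowfix_fold m0 row []
  simpa using this

lemma pv_fillfix_eq (m : Int) (F : Int → Int → Int) :
    (PySem.List.pyRange 0 m 1).foldl (fun mat x =>
        (PySem.List.pyRange 0 m 1).foldl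
          (fun (mat : List (List Int)) y =>
            mat.modify x.toNat (fun row => if row.getD y.toNat 0 = 0 then row.set y.toNat m else row)) mat)
      ((PySem.List.pyRange 1 (m+1) 1).foldl (fun mat x =>
        (PySem.List.pyRange 1 (m+1) 1).foldl
          (fun (mat : List (List Int)) y =>
            mat.modify (x-1).toNat (fun row => row.set (y-1).toNat (PySem.Int.mod (F x y) m))) mat)
        (zeromatrix m))
    = (PySem.List.pyRange 1 (m+1) 1).map (fun x =>
        (PySem.List.pyRange 1 (m+1) 1).map (fun y =>
          if PySem.Int.mod (F x y) m = 0 then m else PySem.Int.mod (F x y) m)) := by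
  simp only [PySem.List.pyRange_one, add_sub_cancel_right, sub_zero, List.foldl_map]
  simp only [add_sub_cancel_left, zero_add, Int.toNat_natCast]
  simp only [pv_foldl_modify_collapse]
  rw [List.range_eq_range', pv_zeromatrix_eq]
  simp only [List.set_eq_modify]
  simp only [pv_pass_replicate]
  rw [pv_fix_matrix m m.toNat
        (List.map (fun (i : Nat) => List.map (fun (i_1 : Nat) => PySem.Int.mod (F (1 + (i:Int)) (1 + (i_1:Int))) m)
          (List.range' 0 m.toNat)) (List.range' 0 m.toNat))
        (by simp)
        (by
          intro row hr
          simp only [List.mem_map] at hr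
          obtain ⟨i, _, hi⟩ := hr
          simp [← hi])]
  simp only [List.map_map, Function.comp_def]

-- (e % m == 0 ? m : e % m) = (e-1) % m + 1 for positive m
lemma pv_mod_shift (m e : Int) (hm : 0 < m) :
    (if PySem.Int.mod e m = 0 then m else PySem.Int.mod e m) = PySem.Int.mod (e-1) m + 1 := by
  rw [PySem.Int.mod_eq_emod_of_pos hm, PySem.Int.mod_eq_emod_of_pos hm]
  have h0 : 0 ≤ e % m := Int.emod_nonneg e (by omega)
  have h1 : e % m < m := Int.emod_lt_of_pos e hm
  have key : (e - 1) % m = (e % m - 1) % m := by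
    conv_lhs => rw [show e - 1 = (e % m - 1) + (e / m) * m from by
      rw [show (e % m - 1) + (e / m) * m = m * (e / m) + e % m - 1 from by ring,
        Int.mul_ediv_add_emod]]
    rw [Int.add_mul_emod_self_right]
  by_cases hr : e % m = 0
  · rw [key, hr]
    have hneg : ((0:Int) - 1) % m = m - 1 := by
      rw [show ((0:Int) - 1) = (m - 1) + (-1) * m from by ring, Int.add_mul_emod_self_right,
        Int.emod_eq_of_lt (by omega) (by omega)]
    rw [hneg, if_pos rfl]
    ring
  · rw [key, Int.emod_eq_of_lt (a := e % m - 1) (b := m) (by omega) (by omega), if_neg hr]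
    ring

-- abqs equals the matrices B's generator builds before reduction of the coefficients
lemma pv_abqs_eq (d s n m : Int) :
    abqs d s n m = [altMat m (-d*s*n*n) n, altMat m d s] := by
  by_cases hm : m ≤ 0
  · have h1 : PySem.List.pyRange 1 (m+1) 1 = [] := PySem.List.pyRange_one_eq_nil (by omega)
    have h2 : PySem.List.pyRange 0 m 1 = [] := PySem.List.pyRange_one_eq_nil (by omega)
    simp [abqs, altMat, h1, h2, pv_zeromatrix_eq, Int.toNat_of_nonpos hm]
  · have hm' : 0 < m := by omega
    unfold abqs
    dsimp only
    rw [pv_double_split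
        (fun x mat y => mat.modify (x-1).toNat
          (fun row => row.set (y-1).toNat (PySem.Int.mod (-d*s*n*n*x + n*y) m)))
        (fun x mat y => mat.modify (x-1).toNat
          (fun row => row.set (y-1).toNat (PySem.Int.mod (d*x + s*y) m)))
        (fun _ => PySem.List.pyRange 1 (m+1) 1) (PySem.List.pyRange 1 (m+1) 1)
        (zeromatrix m, zeromatrix m)]
    have h2 := pv_double_split
        (σ₁ := List (List Int)) (σ₂ := List (List Int))
        (fun x mat y => mat.modify x.toNat
          (fun row => if row.getD y.toNat 0 = 0 then row.set y.toNat m else row))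
        (fun x mat y => mat.modify x.toNat
          (fun row => if row.getD y.toNat 0 = 0 then row.set y.toNat m else row))
        (fun _ => PySem.List.pyRange 0 m 1) (PySem.List.pyRange 0 m 1)
    rw [h2]
    rw [pv_fillfix_eq m (fun x y => -d*s*n*n*x + n*y),
        pv_fillfix_eq m (fun x y => d*x + s*y)]
    unfold altMat
    simp only [pv_mod_shift _ _ hm']

-- the while loops are flat enumerations
lemma pv_loopN_eq (d s m p : Int) :
    ∀ (k : Nat) (n : Int) (out : List (List (List (List Int)))), (p - n).toNat ≤ k →
      abqsLoopN d s m p n out = out ++ (PySem.List.pyRange n p 1).map (fun t => abqs d s t m) := by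
  intro k
  induction k with
  | zero =>
    intro n out h
    rw [abqsLoopN, if_neg (show ¬ n < p by omega),
      PySem.List.pyRange_one_eq_nil (a := n) (b := p) (by omega)]
    simp
  | succ k ih =>
    intro n out h
    by_cases hn : n < p
    · rw [abqsLoopN, if_pos hn]
      rw [ih (n+1) (out ++ [abqs d s n m]) (by omega), PySem.List.pyRange_one_cons hn]
      simp
    · rw [abqsLoopN, if_neg hn, PySem.List.pyRange_one_eq_nil (a := n) (b := p) (by omega)]
      simp

lemma pv_loopS_eq (d m p : Int) :
    ∀ (k : Nat) (s : Int) (out : List (List (List (List Int)))), (p - s).toNat ≤ k →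
      abqsLoopS d m p s out
        = out ++ (PySem.List.pyRange s p 1).flatMap
            (fun s' => (PySem.List.pyRange 0 p 1).map (fun t => abqs d s' t m)) := by
  intro k
  induction k with
  | zero =>
    intro s out h
    rw [abqsLoopS.eq_def, if_neg (show ¬ s < p by omega),
      PySem.List.pyRange_one_eq_nil (a := s) (b := p) (by omega)]
    simp
  | succ k ih =>
    intro s out h
    by_cases hs : s < p
    · rw [abqsLoopS.eq_def, if_pos hs]
      rw [ih (s+1) (abqsLoopN d s m p 0 out) (by omega)]
      rw [pv_loopN_eq d s m p (p - 0).toNat 0 out (by omega)]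
      rw [PySem.List.pyRange_one_cons hs]
      simp
    · rw [abqsLoopS.eq_def, if_neg hs,
        PySem.List.pyRange_one_eq_nil (a := s) (b := p) (by omega)]
      simp

lemma pv_loopD_eq (m p : Int) :
    ∀ (k : Nat) (d : Int) (out : List (List (List (List Int)))), (p - d).toNat ≤ k →
      abqsLoopD m p d out
        = out ++ (PySem.List.pyRange d p 1).flatMap
            (fun d' => (PySem.List.pyRange 0 p 1).flatMap
              (fun s' => (PySem.List.pyRange 0 p 1).map (fun t => abqs d' s' t m))) := by
  intro k
  induction k with
  | zero =>
    intro d out h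
    rw [abqsLoopD.eq_def, if_neg (show ¬ d < p by omega),
      PySem.List.pyRange_one_eq_nil (a := d) (b := p) (by omega)]
    simp
  | succ k ih =>
    intro d out h
    by_cases hd : d < p
    · rw [abqsLoopD.eq_def, if_pos hd]
      rw [ih (d+1) (abqsLoopS d m p 0 out) (by omega)]
      rw [pv_loopS_eq d m p (p - 0).toNat 0 out (by omega)]
      rw [PySem.List.pyRange_one_cons hd]
      simp
    · rw [abqsLoopD.eq_def, if_neg hd,
        PySem.List.pyRange_one_eq_nil (a := d) (b := p) (by omega)]
      simp

-- ===== B-side lemmas: the cache invariant =====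

-- every value stored in the cache is the generator's matrix for its (already reduced) key
def pvCacheOK (m : Int) (cache : PySem.Dict (Int × Int) (List (List Int))) : Prop :=
  ∀ kv ∈ cache.items, kv.2 = altMat m kv.1.1 kv.1.2

-- reducing a coefficient mod m does not change the generated matrix
lemma pv_altMat_norm (m a b : Int) :
    altMat m (if 0 < m then PySem.Int.mod a m else a) (if 0 < m then PySem.Int.mod b m else b)
      = altMat m a b := by
  by_cases hm : 0 < m
  · simp only [if_pos hm]
    unfold altMat
    refine List.map_congr_left (fun x _ => List.map_congr_left (fun y _ => ?_))
    simp only [PySem.Int.mod_eq_emod_of_pos hm]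
    have ha : Int.ModEq m (a % m) a := Int.emod_emod_of_dvd a dvd_rfl
    have hb : Int.ModEq m (b % m) b := Int.emod_emod_of_dvd b dvd_rfl
    exact congrArg (fun t => t + 1) (((ha.mul_right x).add (hb.mul_right y)).sub_right 1)
  · simp [hm]

lemma pv_altGet_spec (m : Int) (cache : PySem.Dict (Int × Int) (List (List Int))) (a b : Int)
    (hc : pvCacheOK m cache) :
    (altGet m cache a b).2 = altMat m a b ∧ pvCacheOK m (altGet m cache a b).1 := by
  unfold altGet
  dsimp only
  split
  · next v hg =>
      refine ⟨?_, hc⟩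
      have := hc _ (PySem.Dict.mem_items_of_get?_eq_some _ hg)
      rw [this]
      exact pv_altMat_norm m a b
  · next hg =>
      refine ⟨pv_altMat_norm m a b, ?_⟩
      intro kv hkv
      rcases (PySem.Dict.mem_items_insert _ _ _ _).1 hkv with h | h
      · subst h; rfl
      · exact hc kv h.1

-- the innermost comprehension loop over n
lemma pv_altLoopN (m d s : Int) :
    ∀ (l : List Int) (st : PySem.Dict (Int × Int) (List (List Int)) × List (List (List (List Int)))),
      pvCacheOK m st.1 →
      (l.foldl (fun st n =>
          let r1 := altGet m st.1 (-d*s*n*n) n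
          let r2 := altGet m r1.1 d s
          (r2.1, st.2 ++ [[r1.2, r2.2]])) st).2
          = st.2 ++ l.map (fun n => [altMat m (-d*s*n*n) n, altMat m d s])
        ∧ pvCacheOK m (l.foldl (fun st n =>
          let r1 := altGet m st.1 (-d*s*n*n) n
          let r2 := altGet m r1.1 d s
          (r2.1, st.2 ++ [[r1.2, r2.2]])) st).1 := by
  intro l
  induction l with
  | nil => intro st h; simpa using h
  | cons n t ih =>
    intro st h
    simp only [List.foldl_cons]
    obtain ⟨h1, h2⟩ := pv_altGet_spec m st.1 (-d*s*n*n) n h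
    obtain ⟨h3, h4⟩ := pv_altGet_spec m (altGet m st.1 (-d*s*n*n) n).1 d s h2
    have hrec := ih ((altGet m (altGet m st.1 (-d*s*n*n) n).1 d s).1, st.2 ++ [[(altGet m st.1 (-d*s*n*n) n).2, (altGet m (altGet m st.1 (-d*s*n*n) n).1 d s).2]]) h4
    refine ⟨?_, hrec.2⟩
    rw [hrec.1, h1, h3]
    simp

-- the middle loop over s
lemma pv_altLoopS (m d : Int) (ln : List Int) :
    ∀ (l : List Int) (st : PySem.Dict (Int × Int) (List (List Int)) × List (List (List (List Int)))),
      pvCacheOK m st.1 →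
      (l.foldl (fun st s => ln.foldl (fun st n =>
          let r1 := altGet m st.1 (-d*s*n*n) n
          let r2 := altGet m r1.1 d s
          (r2.1, st.2 ++ [[r1.2, r2.2]])) st) st).2
          = st.2 ++ l.flatMap (fun s => ln.map (fun n => [altMat m (-d*s*n*n) n, altMat m d s]))
        ∧ pvCacheOK m (l.foldl (fun st s => ln.foldl (fun st n =>
          let r1 := altGet m st.1 (-d*s*n*n) n
          let r2 := altGet m r1.1 d s
          (r2.1, st.2 ++ [[r1.2, r2.2]])) st) st).1 := by
  intro l
  induction l with
  | nil => intro st h; simpa using h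
  | cons s t ih =>
    intro st h
    simp only [List.foldl_cons]
    obtain ⟨h1, h2⟩ := pv_altLoopN m d s ln st h
    obtain ⟨h3, h4⟩ := ih _ h2
    rw [h3, h1]
    exact ⟨by simp, h4⟩

-- the outer loop over d
lemma pv_altLoopD (m : Int) (ln : List Int) :
    ∀ (l : List Int) (st : PySem.Dict (Int × Int) (List (List Int)) × List (List (List (List Int)))),
      pvCacheOK m st.1 →
      (l.foldl (fun st d => ln.foldl (fun st s => ln.foldl (fun st n =>
          let r1 := altGet m st.1 (-d*s*n*n) n
          let r2 := altGet m r1.1 d s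
          (r2.1, st.2 ++ [[r1.2, r2.2]])) st) st) st).2
          = st.2 ++ l.flatMap (fun d => ln.flatMap (fun s =>
              ln.map (fun n => [altMat m (-d*s*n*n) n, altMat m d s]))) := by
  intro l
  induction l with
  | nil => intro st h; simp
  | cons d t ih =>
    intro st h
    simp only [List.foldl_cons]
    obtain ⟨h1, h2⟩ := pv_altLoopS m d ln ln st h
    rw [ih _ h2, h1]
    simp

-- ===== VERDICT (by name: the statement is the Claim_ definition above) =====
theorem abqslist_spec : Claim_equal_abqslist := by
  intro p m _
  show abqslist p m = abqslist_alt p m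
  rw [abqslist, pv_loopD_eq m p (p - 0).toNat 0 [] (by omega)]
  unfold abqslist_alt
  rw [pv_altLoopD m (PySem.List.pyRange 0 p 1) (PySem.List.pyRange 0 p 1)
      (PySem.Dict.empty, []) (by intro kv hkv; simp [PySem.Dict.empty] at hkv)]
  simp only [List.nil_append, pv_abqs_eq]
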